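-- pv_equiv track=rewrite | github.com/jpcosec/podyulsyot3001 | src/core/tools/review_decision_service.py | route_from_decision_values
-- ===== SOURCE A (Python) =====
-- from typing import Any, Literal, Mapping
--
-- DecisionValue = Literal["approve", "request_regeneration", "reject"]
--
-- def route_from_decision_values(decisions: list[str]) -> DecisionValue | None:
--     if not decisions:
--         return None
--
--     if any(value == "reject" for value in decisions):
--         return "reject"
--     if any(value == "request_regeneration" for value in decisions):
--         return "request_regeneration"
--     if all(value == "approve" for value in decisions):
--         return "approve"
--     return None
-- ===== SOURCE B (Python) =====
-- def route_from_decision_values(decisions):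
--     if not decisions:
--         return None
--     saw_reject = saw_regen = saw_non_approve = False
--     for value in decisions:
--         if value == "reject":
--             saw_reject = True
--         elif value == "request_regeneration":
--             saw_regen = True
--         if value != "approve":
--             saw_non_approve = True
--     if saw_reject:
--         return "reject"
--     if saw_regen:
--         return "request_regeneration"
--     if not saw_non_approve:
--         return "approve"
--     return None
-- ===== Notes on version B (the rewrite author's own statement) =====
-- stated objective: alternative
-- what changed: Replaced the three separate short-circuit scans (any/any/all) with one single pass that accumulates three boolean facts and decides the route after the loop.
import Mathlib
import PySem

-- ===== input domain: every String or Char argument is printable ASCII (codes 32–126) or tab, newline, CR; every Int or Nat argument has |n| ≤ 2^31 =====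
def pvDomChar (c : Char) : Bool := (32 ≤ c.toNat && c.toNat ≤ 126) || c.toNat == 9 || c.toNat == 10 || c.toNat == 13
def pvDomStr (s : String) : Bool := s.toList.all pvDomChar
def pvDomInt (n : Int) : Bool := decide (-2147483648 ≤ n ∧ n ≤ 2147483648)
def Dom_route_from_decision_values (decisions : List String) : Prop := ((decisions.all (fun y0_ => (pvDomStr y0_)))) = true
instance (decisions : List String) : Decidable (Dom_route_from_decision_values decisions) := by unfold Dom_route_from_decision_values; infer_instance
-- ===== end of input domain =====

-- B replaces A's three separate any/any/all scans by one single pass that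
-- collects three boolean facts and decides the route afterwards (alternative decomposition).

-- ===== PORT A =====
def route_from_decision_values (decisions : List String) : Option String :=
  if decisions = [] then none
  else if decisions.any (fun value => value == "reject") then some "reject"
  else if decisions.any (fun value => value == "request_regeneration") then some "request_regeneration"
  else if decisions.all (fun value => value == "approve") then some "approve"
  else none

-- ===== PORT B =====
-- one pass accumulating (saw_reject, saw_regen, saw_non_approve)
def pvAltStep (st : Bool × Bool × Bool) (value : String) : Bool × Bool × Bool :=
  let st1 :=
    if value == "reject" then (true, st.2.1, st.2.2)
    else if value == "request_regeneration" then (st.1, true, st.2.2)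
    else st
  if value != "approve" then (st1.1, st1.2.1, true) else st1

def route_from_decision_values_alt (decisions : List String) : Option String :=
  if decisions = [] then none
  else
    let st := decisions.foldl pvAltStep (false, false, false)
    if st.1 then some "reject"
    else if st.2.1 then some "request_regeneration"
    else if !st.2.2 then some "approve"
    else none

-- ===== PRECONDITION & SPEC =====
def Spec_route_from_decision_values (decisions : List String) (out : Option String) : Prop := out = route_from_decision_values_alt decisions
instance (decisions : List String) (out : Option String) : Decidable (Spec_route_from_decision_values decisions out) := by unfold Spec_route_from_decision_values; infer_instance

-- ===== CLAIM (what is proved, stated in full; the proofs are below) =====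
def Claim_equal_route_from_decision_values : Prop := ∀ (decisions : List String), Dom_route_from_decision_values decisions → Spec_route_from_decision_values decisions (route_from_decision_values decisions)

-- ===== LEMMAS AND PROOFS =====

theorem pvAlt_fold_char (l : List String) (r g n : Bool) :
    l.foldl pvAltStep (r, g, n) =
      (r || l.any (fun v => v == "reject"),
       g || l.any (fun v => v == "request_regeneration"),
       n || l.any (fun v => v != "approve")) := by
  induction l generalizing r g n with
  | nil => simp
  | cons x xs ih =>
    simp only [List.foldl_cons, List.any_cons, pvAltStep]
    by_cases hx : x = "reject"
    · subst hx; simp [ih]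
    · by_cases hg : x = "request_regeneration"
      · subst hg; simp [ih]
      · by_cases ha : x = "approve"
        · subst ha; simp [ih]
        · have h1 : (x == "reject") = false := beq_eq_false_iff_ne.mpr hx
          have h2 : (x == "request_regeneration") = false := beq_eq_false_iff_ne.mpr hg
          have h3 : (x != "approve") = true := by simp [ha]
          simp [ih, h1, h2, h3]

-- ===== VERDICT (by name: the statement is the Claim_ definition above) =====
theorem route_from_decision_values_spec : Claim_equal_route_from_decision_values := by
  intro decisions _
  unfold Spec_route_from_decision_values route_from_decision_values route_from_decision_values_alt
  by_cases h : decisions = []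
  · simp [h]
  · simp only [h, if_false, pvAlt_fold_char]
    simp [List.all_eq_not_any_not]
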